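-- pv_equiv track=rewrite | github.com/Josericardo3/FilesPriceModel | Diarias/tools.py | fix_text_list
-- ===== SOURCE A (Python) =====
-- def fix_text_list(features):
-- 	text = ""
-- 	mult = 0
-- 	for i in range(len(features)):
-- 		if i < mult+2:
-- 			text += features[i]+ "  |  "
-- 		else:
-- 			text += " \n "
-- 			text += features[i]+ "  |  "
-- 			mult = i
-- 	return text
-- ===== SOURCE B (Python) =====
-- def fix_text_list(features):
-- 	groups = [features[i:i+2] for i in range(0, len(features), 2)]
-- 	lines = ["".join(f + "  |  " for f in g) for g in groups]
-- 	return " \n ".join(lines)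
-- ===== Notes on version B (the rewrite author's own statement) =====
-- stated objective: idiomatic
-- what changed: A builds the string in one index loop tracking a 'mult' counter to decide where line breaks go; B instead chunks the list into consecutive pairs, renders each chunk with ''.join and joins the lines with ' \n '.join.
import Mathlib
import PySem

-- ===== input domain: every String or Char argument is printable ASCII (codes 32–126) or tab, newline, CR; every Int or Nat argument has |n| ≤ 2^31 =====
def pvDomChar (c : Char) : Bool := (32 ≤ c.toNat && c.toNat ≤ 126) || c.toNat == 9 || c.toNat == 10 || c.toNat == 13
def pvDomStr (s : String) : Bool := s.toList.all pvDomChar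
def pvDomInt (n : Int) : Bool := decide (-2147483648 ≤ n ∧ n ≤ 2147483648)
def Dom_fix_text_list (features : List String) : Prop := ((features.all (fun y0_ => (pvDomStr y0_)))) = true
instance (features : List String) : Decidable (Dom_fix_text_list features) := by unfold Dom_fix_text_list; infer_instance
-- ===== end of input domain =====

-- B replaces A's index loop with its running 'mult' counter by a chunk-into-pairs / join decomposition (idiomatic; return value only).

-- ===== PORT A =====
-- A's loop body; features.getD i "" is exact here: i always satisfies i < features.length (range(len(features))).
def pvStepA (features : List String) (st : String × Nat) (i : Nat) : String × Nat :=
  if i < st.2 + 2 then (st.1 ++ (features.getD i "" ++ "  |  "), st.2)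
  else ((st.1 ++ " \n ") ++ (features.getD i "" ++ "  |  "), i)

def fix_text_list (features : List String) : String :=
  ((List.range features.length).foldl (pvStepA features) ("", 0)).1

-- ===== PORT B =====
-- chunking loop of Source B: consecutive groups of 2 starting at index 0
def pvChunk2 : List String → List (List String)
  | [] => []
  | [x] => [[x]]
  | x :: y :: r => [x, y] :: pvChunk2 r

-- "".join(f + "  |  " for f in g)
def pvLine (g : List String) : String := PySem.Str.join "" (g.map (fun f => f ++ "  |  "))

def fix_text_list_alt (features : List String) : String :=
  PySem.Str.join " \n " ((pvChunk2 features).map pvLine)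

-- ===== PRECONDITION & SPEC =====
def Spec_fix_text_list (features : List String) (out : String) : Prop := out = fix_text_list_alt features
instance (features : List String) (out : String) : Decidable (Spec_fix_text_list features out) := by unfold Spec_fix_text_list; infer_instance

-- ===== CLAIM (what is proved, stated in full; the proofs are below) =====
def Claim_equal_fix_text_list : Prop := ∀ (features : List String), Dom_fix_text_list features → Spec_fix_text_list features (fix_text_list features)

-- ===== LEMMAS AND PROOFS =====

-- join facts instantiated at the String level
theorem pvJoin_nil (sep : String) : PySem.Str.join sep [] = "" := by
  simp [PySem.Str.join, PySem.Chars.join_nil]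

theorem pvJoin_singleton (sep a : String) : PySem.Str.join sep [a] = a := by
  simp [PySem.Str.join, PySem.Chars.join_singleton]

theorem pvJoin_cons_cons (sep a b : String) (l : List String) :
    PySem.Str.join sep (a :: b :: l) = a ++ sep ++ PySem.Str.join sep (b :: l) := by
  simp [PySem.Str.join, PySem.Chars.join_cons_cons, String.append_assoc]

theorem pvJoin_empty_cons (x : String) (l : List String) :
    PySem.Str.join "" (x :: l) = x ++ PySem.Str.join "" l := by
  cases l with
  | nil => simp [pvJoin_singleton, pvJoin_nil]
  | cons y ys => rw [pvJoin_cons_cons]; simp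

-- each line of B, unfolded
theorem pvLine_single (x : String) : pvLine [x] = x ++ "  |  " := by
  simp [pvLine, pvJoin_singleton]

theorem pvLine_pair (x y : String) : pvLine [x, y] = x ++ "  |  " ++ (y ++ "  |  ") := by
  simp [pvLine, pvJoin_cons_cons, pvJoin_singleton, String.append_assoc]

-- the generalized A-loop invariant: processing the suffix ys (features = pre ++ ys) from an even
-- index pre.length > 0 with mult = pre.length - 2 produces one " \n "-prefixed line per pair of ys.
theorem pvLoopA_tail (ys : List String) : ∀ (fs pre : List String) (t : String),
    fs = pre ++ ys → pre.length % 2 = 0 → pre.length ≠ 0 →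
    ((List.range' pre.length ys.length 1).foldl (pvStepA fs) (t, pre.length - 2)).1
      = t ++ PySem.Str.join "" ((pvChunk2 ys).map (fun g => " \n " ++ pvLine g)) := by
  induction ys using pvChunk2.induct with
  | case1 =>
    intro fs pre t hfs _ _
    simp [pvChunk2, pvJoin_nil]
  | case2 x =>
    intro fs pre t hfs hev hne
    have h1 : ¬ (pre.length < pre.length - 2 + 2) := by omega
    have hgx : fs[pre.length]?.getD "" = x := by
      subst hfs; rw [List.getElem?_append_right (le_refl _)]; simp
    simp only [pvChunk2, List.length_cons, List.length_nil, List.range'_succ, List.range',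
      List.foldl_cons, List.foldl_nil, pvStepA, List.getD_eq_getElem?_getD, if_neg h1, hgx,
      List.map_cons, List.map_nil, pvJoin_singleton, pvLine_single]
    simp [String.append_assoc]
  | case3 x y r ih =>
    intro fs pre t hfs hev hne
    have h1 : ¬ (pre.length < pre.length - 2 + 2) := by omega
    have h2 : pre.length + 1 < pre.length + 2 := by omega
    have hgx : fs[pre.length]?.getD "" = x := by
      subst hfs; rw [List.getElem?_append_right (le_refl _)]; simp
    have hgy : fs[pre.length + 1]?.getD "" = y := by
      subst hfs; rw [List.getElem?_append_right (by omega)]; simp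
    have hfs' : fs = (pre ++ [x, y]) ++ r := by simp [hfs]
    have hev' : (pre ++ [x, y]).length % 2 = 0 := by simp [List.length_append]; omega
    have hne' : (pre ++ [x, y]).length ≠ 0 := by simp
    have ihr := ih fs (pre ++ [x, y])
      (t ++ " \n " ++ (x ++ "  |  ") ++ (y ++ "  |  ")) hfs' hev' hne'
    simp only [List.length_append, List.length_cons, List.length_nil] at ihr
    have hrw : pre.length + (0 + 1 + 1) - 2 = pre.length := by omega
    rw [hrw] at ihr
    show ((List.range' pre.length (r.length + 1 + 1) 1).foldl (pvStepA fs) (t, pre.length - 2)).1 = _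
    rw [List.range'_succ, List.range'_succ]
    simp only [List.foldl_cons]
    rw [show pvStepA fs (t, pre.length - 2) pre.length
        = (t ++ " \n " ++ (x ++ "  |  "), pre.length) from by
      simp only [pvStepA, List.getD_eq_getElem?_getD, if_neg h1, hgx]]
    rw [show pvStepA fs (t ++ " \n " ++ (x ++ "  |  "), pre.length) (pre.length + 1)
        = (t ++ " \n " ++ (x ++ "  |  ") ++ (y ++ "  |  "), pre.length) from by
      simp only [pvStepA, List.getD_eq_getElem?_getD, if_pos h2, hgy]]
    rw [show pre.length + 1 + 1 = pre.length + (0 + 1 + 1) from by ring, ihr]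
    rw [show pvChunk2 (x :: y :: r) = [x, y] :: pvChunk2 r from rfl]
    rw [List.map_cons, pvJoin_empty_cons]
    simp [pvLine_pair, String.append_assoc]

-- the " \n "-prefixed tail equals Str.join " \n " once a first line exists
theorem pvJoin_tail (ls : List String) : ∀ (a : String),
    a ++ PySem.Str.join "" (ls.map (fun g => " \n " ++ g)) = PySem.Str.join " \n " (a :: ls) := by
  induction ls with
  | nil => intro a; simp [pvJoin_nil, pvJoin_singleton]
  | cons b bs ih =>
    intro a
    rw [List.map_cons, pvJoin_empty_cons, pvJoin_cons_cons, ← ih b]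
    simp [String.append_assoc]

-- ===== VERDICT (by name: the statement is the Claim_ definition above) =====
theorem fix_text_list_spec : Claim_equal_fix_text_list := by
  intro features _
  unfold Spec_fix_text_list
  cases features with
  | nil => simp [fix_text_list, fix_text_list_alt, pvChunk2, pvJoin_nil]
  | cons x ys =>
    cases ys with
    | nil =>
      show ((List.range 1).foldl (pvStepA [x]) ("", 0)).1 = _
      rw [show List.range 1 = [0] from rfl]
      simp only [List.foldl_cons, List.foldl_nil, pvStepA]
      rw [if_pos (by omega : 0 < 0 + 2)]
      simp [fix_text_list_alt, pvChunk2, pvJoin_singleton, pvLine_single]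
    | cons y r =>
      show ((List.range (r.length + 1 + 1)).foldl (pvStepA (x :: y :: r)) ("", 0)).1 = _
      rw [List.range_eq_range', List.range'_succ, List.range'_succ]
      simp only [List.foldl_cons]
      rw [show pvStepA (x :: y :: r) ("", 0) 0 = ("" ++ (x ++ "  |  "), 0) from by
        simp [pvStepA]]
      rw [show pvStepA (x :: y :: r) ("" ++ (x ++ "  |  "), 0) 1
          = ("" ++ (x ++ "  |  ") ++ (y ++ "  |  "), 0) from by
        simp [pvStepA]]
      have h := pvLoopA_tail r (x :: y :: r) [x, y] ("" ++ (x ++ "  |  ") ++ (y ++ "  |  "))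
        rfl (by simp) (by simp)
      simp only [List.length_cons, List.length_nil] at h
      rw [show (0 : Nat) + 1 + 1 = 0 + 1 + 1 from rfl] at h
      rw [show (0 + 1 + 1 : Nat) - 2 = 0 from rfl] at h
      rw [h]
      rw [show fix_text_list_alt (x :: y :: r)
          = PySem.Str.join " \n " (pvLine [x, y] :: (pvChunk2 r).map pvLine) from rfl]
      rw [← pvJoin_tail ((pvChunk2 r).map pvLine) (pvLine [x, y]), List.map_map]
      simp [pvLine_pair, String.append_assoc, Function.comp_def]
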